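-- pv_equiv track=rewrite | github.com/marcellbarsony/arch-tools | xtools/displays.py | display_profiles
-- ===== SOURCE A (Python) =====
-- def display_profiles(displays: list) -> list:
--     cmd = []
--     for display in displays:
--         if display == 'eDP1' or display == 'eDP-1':
--             cmd.append(f'xrandr --output {display} --mode 1920x1200 --pos 0x0 --rotate normal')
--             if display == 'HDMI1' or display == 'HDMI-1':
--                 cmd.append(f'xrandr --output {display} --mode 1920x1080 --pos 1920x0 --rotate normal')
--             if display == 'DP1' or display == 'DP-1':
--                 cmd.append(f'xrandr --output {display} --mode 1920x1080 --pos 3840x0 --rotate normal --primary')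
--         else:
--             if display == 'HDMI1' or display == 'HDMI-1':
--                 cmd.append(f'xrandr --output {display} --mode 1920x1080 --pos 0x0 --rotate normal')
--             if display == 'DP1' or display == 'DP-1':
--                 cmd.append(f'xrandr --output {display} --mode 1920x1080 --pos 1920x0 --rotate normal --primary')
--     return cmd
-- ===== SOURCE B (Python) =====
-- def display_profiles(displays: list) -> list:
--     cmd = []
--     for d in displays:
--         # parse the name: accepted names are a connector kind plus an
--         # optional '-' and the index '1'
--         if d.endswith('-1'):
--             kind = d[:-2]
--         elif d.endswith('1'):
--             kind = d[:-1]
--         else: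
--             continue
--         if kind == 'eDP':
--             args = '--mode 1920x1200 --pos 0x0 --rotate normal'
--         elif kind == 'HDMI':
--             args = '--mode 1920x1080 --pos 0x0 --rotate normal'
--         elif kind == 'DP':
--             args = '--mode 1920x1080 --pos 1920x0 --rotate normal --primary'
--         else:
--             continue
--         cmd.append(f'xrandr --output {d} {args}')
--     return cmd
-- ===== Notes on version B (the rewrite author's own statement) =====
-- stated objective: alternative
-- what changed: Instead of A's chain of whole-name equality branches (with dead nested eDP cases), B parses each display name by stripping the '1'/'-1' index suffix and dispatches on the connector kind (eDP/HDMI/DP) to pick the mode/pos/primary arguments, then formats one command string.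
import Mathlib
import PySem

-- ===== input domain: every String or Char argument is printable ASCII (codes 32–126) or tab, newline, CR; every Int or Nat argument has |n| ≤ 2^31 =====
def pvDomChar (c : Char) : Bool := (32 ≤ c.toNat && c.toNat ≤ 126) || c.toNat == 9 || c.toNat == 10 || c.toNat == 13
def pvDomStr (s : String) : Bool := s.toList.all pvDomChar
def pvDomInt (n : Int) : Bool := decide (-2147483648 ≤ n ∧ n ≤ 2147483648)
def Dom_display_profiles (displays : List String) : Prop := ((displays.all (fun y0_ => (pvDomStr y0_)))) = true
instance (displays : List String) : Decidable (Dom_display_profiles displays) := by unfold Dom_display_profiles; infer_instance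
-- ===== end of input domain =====

-- B parses each display name (strip the '1'/'−1' index suffix, dispatch on the connector kind)
-- instead of A's chain of whole-name equality branches; idiomatic rewrite, return values proved equal.

-- ===== PORT A =====
def display_profiles (displays : List String) : List String :=
  displays.foldl (fun cmd display =>
    if display == "eDP1" || display == "eDP-1" then
      let cmd := cmd ++ ["xrandr --output " ++ display ++ " --mode 1920x1200 --pos 0x0 --rotate normal"]
      let cmd := if display == "HDMI1" || display == "HDMI-1" then
        cmd ++ ["xrandr --output " ++ display ++ " --mode 1920x1080 --pos 1920x0 --rotate normal"] else cmd
      let cmd := if display == "DP1" || display == "DP-1" then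
        cmd ++ ["xrandr --output " ++ display ++ " --mode 1920x1080 --pos 3840x0 --rotate normal --primary"] else cmd
      cmd
    else
      let cmd := if display == "HDMI1" || display == "HDMI-1" then
        cmd ++ ["xrandr --output " ++ display ++ " --mode 1920x1080 --pos 0x0 --rotate normal"] else cmd
      let cmd := if display == "DP1" || display == "DP-1" then
        cmd ++ ["xrandr --output " ++ display ++ " --mode 1920x1080 --pos 1920x0 --rotate normal --primary"] else cmd
      cmd) []

-- ===== PORT B =====
-- Source B's suffix parse: 'd[:-2]' / 'd[:-1]' after endswith, over code points (PySem.Chars/List.slice)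
def pvKind (d : String) : Option (List Char) :=
  if PySem.Chars.endswith d.toList "-1".toList then
    some (PySem.List.slice d.toList none (some (-2)))
  else if PySem.Chars.endswith d.toList "1".toList then
    some (PySem.List.slice d.toList none (some (-1)))
  else none

-- Source B's kind → args elif chain
def pvArgs (kind : List Char) : Option String :=
  if kind = "eDP".toList then some "--mode 1920x1200 --pos 0x0 --rotate normal"
  else if kind = "HDMI".toList then some "--mode 1920x1080 --pos 0x0 --rotate normal"
  else if kind = "DP".toList then some "--mode 1920x1080 --pos 1920x0 --rotate normal --primary"
  else none

def display_profiles_alt (displays : List String) : List String :=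
  displays.foldl (fun cmd d =>
    match pvKind d with
    | none => cmd                -- no index suffix: continue
    | some kind =>
      match pvArgs kind with
      | none => cmd              -- unknown connector kind: continue
      | some args => cmd ++ ["xrandr --output " ++ d ++ " " ++ args]) []

-- ===== PRECONDITION & SPEC =====
def Spec_display_profiles (displays : List String) (out : List String) : Prop := out = display_profiles_alt displays
instance (displays : List String) (out : List String) : Decidable (Spec_display_profiles displays out) := by unfold Spec_display_profiles; infer_instance

-- ===== CLAIM (what is proved, stated in full; the proofs are below) =====
def Claim_equal_display_profiles : Prop := ∀ (displays : List String), Dom_display_profiles displays → Spec_display_profiles displays (display_profiles displays)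

-- ===== LEMMAS AND PROOFS =====

-- B's per-element step, named for the proofs
def pvStepB (cmd : List String) (d : String) : List String :=
  match pvKind d with
  | none => cmd
  | some kind =>
    match pvArgs kind with
    | none => cmd
    | some args => cmd ++ ["xrandr --output " ++ d ++ " " ++ args]

-- If d is none of the six accepted names, B's parse emits nothing.
theorem pvStepB_other (cmd : List String) (d : String)
    (h1 : d ≠ "eDP1") (h2 : d ≠ "eDP-1") (h3 : d ≠ "HDMI1") (h4 : d ≠ "HDMI-1")
    (h5 : d ≠ "DP1") (h6 : d ≠ "DP-1") : pvStepB cmd d = cmd := by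
  unfold pvStepB pvKind
  by_cases hA : PySem.Chars.endswith d.toList "-1".toList = true
  · obtain ⟨pre, hpre⟩ := (PySem.Chars.endswith_iff _ _).mp hA
    simp only [hA, if_pos]
    rw [PySem.List.slice_to_neg_ofNat d.toList 2 (by omega)]
    have hlen : d.toList.length - 2 = pre.length := by
      rw [← hpre]; simp [List.length_append]
    rw [hlen, ← hpre, List.take_left]
    unfold pvArgs
    have e1 : pre ≠ ['e','D','P'] := by
      intro h; apply h2; apply String.toList_inj.mp; rw [← hpre, h]; decide
    have e2 : pre ≠ ['H','D','M','I'] := by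
      intro h; apply h4; apply String.toList_inj.mp; rw [← hpre, h]; decide
    have e3 : pre ≠ ['D','P'] := by
      intro h; apply h6; apply String.toList_inj.mp; rw [← hpre, h]; decide
    simp [e1, e2, e3]
  · by_cases hB : PySem.Chars.endswith d.toList "1".toList = true
    · obtain ⟨pre, hpre⟩ := (PySem.Chars.endswith_iff _ _).mp hB
      simp only [hA, hB, if_pos, if_neg, Bool.false_eq_true, not_false_iff]
      rw [PySem.List.slice_to_neg_one]
      have hdl : d.toList.dropLast = pre := by rw [← hpre]; simp
      rw [hdl]
      unfold pvArgs
      have e1 : pre ≠ ['e','D','P'] := by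
        intro h; apply h1; apply String.toList_inj.mp; rw [← hpre, h]; decide
      have e2 : pre ≠ ['H','D','M','I'] := by
        intro h; apply h3; apply String.toList_inj.mp; rw [← hpre, h]; decide
      have e3 : pre ≠ ['D','P'] := by
        intro h; apply h5; apply String.toList_inj.mp; rw [← hpre, h]; decide
      simp [e1, e2, e3]
    · rw [show ("-1".toList) = ['-','1'] from rfl] at hA
      rw [show ("1".toList) = ['1'] from rfl] at hB
      simp [hA, hB]

-- The two per-element steps agree on every display name.
theorem step_eq (cmd : List String) (d : String) :
    (if d == "eDP1" || d == "eDP-1" then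
      let c := cmd ++ ["xrandr --output " ++ d ++ " --mode 1920x1200 --pos 0x0 --rotate normal"]
      let c := if d == "HDMI1" || d == "HDMI-1" then
        c ++ ["xrandr --output " ++ d ++ " --mode 1920x1080 --pos 1920x0 --rotate normal"] else c
      let c := if d == "DP1" || d == "DP-1" then
        c ++ ["xrandr --output " ++ d ++ " --mode 1920x1080 --pos 3840x0 --rotate normal --primary"] else c
      c
    else
      let c := if d == "HDMI1" || d == "HDMI-1" then
        cmd ++ ["xrandr --output " ++ d ++ " --mode 1920x1080 --pos 0x0 --rotate normal"] else cmd
      let c := if d == "DP1" || d == "DP-1" then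
        c ++ ["xrandr --output " ++ d ++ " --mode 1920x1080 --pos 1920x0 --rotate normal --primary"] else c
      c) = pvStepB cmd d := by
  by_cases h1 : d = "eDP1"; · subst h1; rfl
  by_cases h2 : d = "eDP-1"; · subst h2; rfl
  by_cases h3 : d = "HDMI1"; · subst h3; rfl
  by_cases h4 : d = "HDMI-1"; · subst h4; rfl
  by_cases h5 : d = "DP1"; · subst h5; rfl
  by_cases h6 : d = "DP-1"; · subst h6; rfl
  rw [pvStepB_other cmd d h1 h2 h3 h4 h5 h6]
  simp [beq_iff_eq, h1, h2, h3, h4, h5, h6]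

-- ===== VERDICT (by name: the statement is the Claim_ definition above) =====
theorem display_profiles_spec : Claim_equal_display_profiles := by
  intro displays _
  unfold Spec_display_profiles display_profiles display_profiles_alt
  apply PySem.List.foldl_congr_mem
  intro acc x _
  exact step_eq acc x
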